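-- pv_equiv track=rewrite | github.com/vishalsachdev/makerlab | scripts/download_squarespace_images.py | categorize_image
-- ===== SOURCE A (Python) =====
-- def categorize_image(file_path, url):
--     """Determine which category folder an image should go into"""
--     file_path = str(file_path).lower()
--     url_lower = url.lower()
--
--     if 'blog/' in file_path:
--         return 'blog'
--     elif 'courses/' in file_path:
--         return 'courses'
--     elif 'summer/' in file_path or 'summer' in file_path or 'summer' in url_lower:
--         return 'summer'
--     elif 'staff' in file_path or 'staff' in url_lower:
--         return 'staff'
--     elif any(word in file_path or word in url_lower for word in ['workshop', 'birthday', 'event', 'party']):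
--         return 'events'
--     else:
--         return 'general'
-- ===== SOURCE B (Python) =====
-- _PATH_RANKS = [('blog/', 0), ('courses/', 1), ('summer', 2), ('staff', 3),
--                ('workshop', 4), ('birthday', 4), ('event', 4), ('party', 4)]
-- _URL_RANKS = [('summer', 2), ('staff', 3),
--               ('workshop', 4), ('birthday', 4), ('event', 4), ('party', 4)]
-- _CATEGORIES = ['blog', 'courses', 'summer', 'staff', 'events', 'general']
--
--
-- def categorize_image(file_path, url):
--     """Determine which category folder an image should go into"""
--     fp = str(file_path).lower()
--     ul = url.lower()
--     best = 5
--     for word, rank in _PATH_RANKS: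
--         if rank < best and word in fp:
--             best = rank
--     for word, rank in _URL_RANKS:
--         if rank < best and word in ul:
--             best = rank
--     return _CATEGORIES[best]
-- ===== Notes on version B (the rewrite author's own statement) =====
-- stated objective: alternative
-- what changed: Instead of an early-return if-elif cascade, B assigns every keyword a priority rank, scans all keywords keeping the minimum rank that matches (dropping A's redundant 'summer/' test), and indexes the category name from that minimum.
import Mathlib
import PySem

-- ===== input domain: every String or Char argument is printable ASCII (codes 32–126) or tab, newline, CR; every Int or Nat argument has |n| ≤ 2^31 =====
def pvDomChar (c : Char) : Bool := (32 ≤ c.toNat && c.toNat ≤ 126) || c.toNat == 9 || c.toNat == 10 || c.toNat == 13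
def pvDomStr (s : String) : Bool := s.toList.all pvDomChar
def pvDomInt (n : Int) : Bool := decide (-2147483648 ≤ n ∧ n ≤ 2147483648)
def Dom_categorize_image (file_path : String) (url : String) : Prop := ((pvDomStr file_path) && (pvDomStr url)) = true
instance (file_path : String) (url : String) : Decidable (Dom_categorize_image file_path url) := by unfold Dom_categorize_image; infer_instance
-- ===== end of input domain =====

-- B replaces A's early-return if-elif cascade by a min-rank keyword scan over a priority table (objective: alternative); same cost.


-- ===== PORT A =====
def categorize_image (file_path : String) (url : String) : String :=
  let fp := PySem.Str.lower file_path
  let url_lower := PySem.Str.lower url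
  if PySem.Str.isIn "blog/" fp then "blog"
  else if PySem.Str.isIn "courses/" fp then "courses"
  else if PySem.Str.isIn "summer/" fp || PySem.Str.isIn "summer" fp || PySem.Str.isIn "summer" url_lower then "summer"
  else if PySem.Str.isIn "staff" fp || PySem.Str.isIn "staff" url_lower then "staff"
  else if (["workshop", "birthday", "event", "party"].any
      (fun word => PySem.Str.isIn word fp || PySem.Str.isIn word url_lower)) then "events"
  else "general"

-- ===== PORT B =====
def pvPathRanks : List (String × Nat) :=
  [("blog/", 0), ("courses/", 1), ("summer", 2), ("staff", 3),
   ("workshop", 4), ("birthday", 4), ("event", 4), ("party", 4)]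

def pvUrlRanks : List (String × Nat) :=
  [("summer", 2), ("staff", 3), ("workshop", 4), ("birthday", 4), ("event", 4), ("party", 4)]

def pvCategories : List String := ["blog", "courses", "summer", "staff", "events", "general"]

def categorize_image_alt (file_path : String) (url : String) : String :=
  let fp := PySem.Str.lower file_path
  let ul := PySem.Str.lower url
  let best1 := pvPathRanks.foldl
    (fun best p => if decide (p.2 < best) && PySem.Str.isIn p.1 fp then p.2 else best) 5
  let best2 := pvUrlRanks.foldl
    (fun best p => if decide (p.2 < best) && PySem.Str.isIn p.1 ul then p.2 else best) best1
  pvCategories.getD best2 "general"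

-- ===== PRECONDITION & SPEC =====
def Spec_categorize_image (file_path : String) (url : String) (out : String) : Prop := out = categorize_image_alt file_path url
instance (file_path : String) (url : String) (out : String) : Decidable (Spec_categorize_image file_path url out) := by unfold Spec_categorize_image; infer_instance

-- ===== CLAIM (what is proved, stated in full; the proofs are below) =====
def Claim_equal_categorize_image : Prop := ∀ (file_path : String) (url : String), Dom_categorize_image file_path url → Spec_categorize_image file_path url (categorize_image file_path url)

-- ===== LEMMAS AND PROOFS =====

-- "summer/" occurring in s forces "summer" occurring in s (B's table has no 'summer/' entry)
lemma summer_isIn {s : String} (h : PySem.Str.isIn "summer/" s = true) :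
    PySem.Str.isIn "summer" s = true := by
  rw [PySem.Str.isIn_iff_infix] at h ⊢
  exact List.IsInfix.trans (by decide) h

-- boolean abstraction of the two programs: A's cascade vs B's min-rank fold, as functions of
-- the 15 individual substring tests (a3 = "summer/" in fp, a4 = "summer" in fp)
set_option maxHeartbeats 4000000 in
lemma table_eq : ∀ (a1 a2 a3 a4 a5 a6 a7 a8 a9 a10 a11 a12 a13 a14 a15 : Bool),
    (a3 = true → a4 = true) →
    (if a1 then "blog"
     else if a2 then "courses"
     else if a3 || a4 || a5 then "summer"
     else if a6 || a7 then "staff"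
     else if (a8 || a12) || ((a9 || a13) || ((a10 || a14) || (a11 || a15))) then "events"
     else "general")
    =
    (let best1 :=
      [((0:Nat), a1), (1, a2), (2, a4), (3, a6), (4, a8), (4, a9), (4, a10), (4, a11)].foldl
        (fun best p => if decide (p.1 < best) && p.2 then p.1 else best) 5
     let best2 :=
      [((2:Nat), a5), (3, a7), (4, a12), (4, a13), (4, a14), (4, a15)].foldl
        (fun best p => if decide (p.1 < best) && p.2 then p.1 else best) best1
     pvCategories.getD best2 "general") := by decide

-- ===== VERDICT (by name: the statement is the Claim_ definition above) =====
theorem categorize_image_spec : Claim_equal_categorize_image := by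
  intro file_path url _
  unfold Spec_categorize_image categorize_image categorize_image_alt
  dsimp only
  have h := table_eq
    (PySem.Str.isIn "blog/" (PySem.Str.lower file_path))
    (PySem.Str.isIn "courses/" (PySem.Str.lower file_path))
    (PySem.Str.isIn "summer/" (PySem.Str.lower file_path))
    (PySem.Str.isIn "summer" (PySem.Str.lower file_path))
    (PySem.Str.isIn "summer" (PySem.Str.lower url))
    (PySem.Str.isIn "staff" (PySem.Str.lower file_path))
    (PySem.Str.isIn "staff" (PySem.Str.lower url))
    (PySem.Str.isIn "workshop" (PySem.Str.lower file_path))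
    (PySem.Str.isIn "birthday" (PySem.Str.lower file_path))
    (PySem.Str.isIn "event" (PySem.Str.lower file_path))
    (PySem.Str.isIn "party" (PySem.Str.lower file_path))
    (PySem.Str.isIn "workshop" (PySem.Str.lower url))
    (PySem.Str.isIn "birthday" (PySem.Str.lower url))
    (PySem.Str.isIn "event" (PySem.Str.lower url))
    (PySem.Str.isIn "party" (PySem.Str.lower url))
    (fun hs => summer_isIn hs)
  dsimp only at h
  rw [show ([((0:Nat), PySem.Str.isIn "blog/" (PySem.Str.lower file_path)),
        (1, PySem.Str.isIn "courses/" (PySem.Str.lower file_path)),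
        (2, PySem.Str.isIn "summer" (PySem.Str.lower file_path)),
        (3, PySem.Str.isIn "staff" (PySem.Str.lower file_path)),
        (4, PySem.Str.isIn "workshop" (PySem.Str.lower file_path)),
        (4, PySem.Str.isIn "birthday" (PySem.Str.lower file_path)),
        (4, PySem.Str.isIn "event" (PySem.Str.lower file_path)),
        (4, PySem.Str.isIn "party" (PySem.Str.lower file_path))] : List (Nat × Bool))
      = pvPathRanks.map (fun p => (p.2, PySem.Str.isIn p.1 (PySem.Str.lower file_path))) from rfl,
      show ([((2:Nat), PySem.Str.isIn "summer" (PySem.Str.lower url)),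
        (3, PySem.Str.isIn "staff" (PySem.Str.lower url)),
        (4, PySem.Str.isIn "workshop" (PySem.Str.lower url)),
        (4, PySem.Str.isIn "birthday" (PySem.Str.lower url)),
        (4, PySem.Str.isIn "event" (PySem.Str.lower url)),
        (4, PySem.Str.isIn "party" (PySem.Str.lower url))] : List (Nat × Bool))
      = pvUrlRanks.map (fun p => (p.2, PySem.Str.isIn p.1 (PySem.Str.lower url))) from rfl,
      List.foldl_map, List.foldl_map] at h
  simp only [List.any_cons, List.any_nil, Bool.or_false]
  exact h
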